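-- pv_equiv track=rewrite | github.com/sungbeom78/bomiyang-glossary | generate_glossary.py | _strip_numeric_suffix
-- ===== SOURCE A (Python) =====
-- def _strip_numeric_suffix(tokens: list) -> list:
--     """
--     같은 알파 접두사에 숫자만 다른 토큰이 2개 이상 존재하면
--     숫자 부분을 제거하고 알파 부분만 남긴다.
--
--     예) ['stage', '1'], ['stage', '2'], ['stage', '3']  →  ['stage']
--         ['scenario', '1'], ['scenario', '2']              →  ['scenario']
--         ['phase', '1']  (단 1개)                           →  ['phase', '1']  (제거 안 함)
--
--     처리 대상: 순수 숫자 토큰이 바로 앞 알파 토큰과 짝을 이루는 경우만.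
--     이는 tokenize() 내부에서 이미 분리된 토큰 목록에 적용한다.
--     """
--     from collections import defaultdict
--     # [alpha_prefix → list[numeric_token]] 집계
--     prefix_nums: dict[str, list[str]] = defaultdict(list)
--     i = 0
--     # (alpha, digit) 인접 쌍을 수집
--     while i < len(tokens) - 1:
--         alpha = tokens[i]
--         digit = tokens[i + 1]
--         if alpha.isalpha() and digit.isdigit():
--             prefix_nums[alpha].append(digit)
--         i += 1
--
--     # 2개 이상의 숫자 변형이 있는 접두사만 대상으로 삼음
--     remove_pairs: set[tuple[str, str]] = set()
--     for alpha, nums in prefix_nums.items():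
--         if len(nums) >= 2:
--             for n in nums:
--                 remove_pairs.add((alpha, n))
--
--     if not remove_pairs:
--         return tokens
--
--     # remove_pairs에 해당하는 (alpha, digit) 인접 쌍에서 digit 제거
--     result: list[str] = []
--     i = 0
--     while i < len(tokens):
--         if i < len(tokens) - 1:
--             pair = (tokens[i], tokens[i + 1])
--             if pair in remove_pairs:
--                 result.append(tokens[i])
--                 i += 2  # digit 건너뜀
--                 continue
--         result.append(tokens[i])
--         i += 1
--     return result
-- ===== SOURCE B (Python) =====
-- def _strip_numeric_suffix(tokens: list) -> list:
--     # Find prefixes heading >= 2 adjacent (alpha, digit) pairs by SORTING the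
--     # pair heads and scanning for equal neighbours (no dict/counter at all).
--     keys = sorted(a for a, b in zip(tokens, tokens[1:])
--                   if a.isalpha() and b.isdigit())
--     dups = {a for a, b in zip(keys, keys[1:]) if a == b}
--     # One streaming pass with a carry flag: drop a digit right after a token
--     # in dups; no index arithmetic, no lookahead.
--     out = []
--     skip = False
--     for t in tokens:
--         if skip and t.isdigit():
--             skip = False
--         else:
--             out.append(t)
--             skip = t in dups
--     return out
-- ===== Notes on version B (the rewrite author's own statement) =====
-- stated objective: alternative
-- what changed: Replaces A's defaultdict-of-digit-lists plus remove_pairs set plus i+=2 index-jumping emit loop by a sort-based duplicate detection (sort the adjacent alpha-digit pair heads, a prefix qualifies iff it has an equal neighbour in sorted order; no dict at all) and a single streaming pass with a boolean carry flag that drops a digit token right after a qualifying prefix.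
import Mathlib
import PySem

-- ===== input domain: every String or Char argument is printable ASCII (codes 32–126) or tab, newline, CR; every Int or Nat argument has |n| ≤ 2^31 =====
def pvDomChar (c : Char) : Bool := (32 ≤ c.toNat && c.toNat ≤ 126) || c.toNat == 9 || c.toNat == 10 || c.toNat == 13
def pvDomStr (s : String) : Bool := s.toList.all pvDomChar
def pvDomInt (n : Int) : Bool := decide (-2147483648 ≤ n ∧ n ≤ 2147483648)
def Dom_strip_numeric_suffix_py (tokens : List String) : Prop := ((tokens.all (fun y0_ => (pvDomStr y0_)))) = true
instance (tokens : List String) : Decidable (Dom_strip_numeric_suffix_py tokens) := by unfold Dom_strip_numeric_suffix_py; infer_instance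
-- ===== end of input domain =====

-- B replaces A's defaultdict-of-lists + remove_pairs set + i+=2 skip loop by sort-based
-- duplicate detection (equal neighbours in the sorted pair heads) and one streaming pass
-- with a carry flag (objective: alternative).


-- ===== PORT A =====
-- first while loop: collect adjacent (alpha, digit) pairs into defaultdict(list)
def pvA_collect (tokens : List String) (d : PySem.Dict String (List String)) :
    Nat → Nat → PySem.Dict String (List String)
  | 0, _ => d
  | fuel + 1, i =>
    if i + 1 < tokens.length then
      pvA_collect tokens
        (if PySem.Str.strIsalpha (PySem.List.pyGetD tokens (i : Int) "") &&
            PySem.Str.strIsdigit (PySem.List.pyGetD tokens ((i : Int) + 1) "") then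
          d.modify (PySem.List.pyGetD tokens (i : Int) "") []
            (· ++ [PySem.List.pyGetD tokens ((i : Int) + 1) ""])
        else d) fuel (i + 1)
    else d

-- build remove_pairs from the dict items
def pvA_removePairs (pn : PySem.Dict String (List String)) : PySem.Set (String × String) :=
  pn.items.foldl
    (fun s p => if 2 ≤ p.2.length then p.2.foldl (fun s n => PySem.Set.add s (p.1, n)) s else s)
    PySem.Set.empty

-- second while loop: emit tokens, skipping the digit of a pair in remove_pairs (i += 2)
def pvA_emit (tokens : List String) (rp : PySem.Set (String × String)) :
    Nat → Nat → List String
  | 0, _ => []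
  | fuel + 1, i =>
    if i < tokens.length then
      if i + 1 < tokens.length ∧
          PySem.Set.contains rp
            (PySem.List.pyGetD tokens (i : Int) "", PySem.List.pyGetD tokens ((i : Int) + 1) "") = true then
        PySem.List.pyGetD tokens (i : Int) "" :: pvA_emit tokens rp fuel (i + 2)
      else
        PySem.List.pyGetD tokens (i : Int) "" :: pvA_emit tokens rp fuel (i + 1)
    else []

def strip_numeric_suffix_py (tokens : List String) : List String :=
  let pn := pvA_collect tokens PySem.Dict.empty tokens.length 0
  let rp := pvA_removePairs pn
  if rp.isEmpty then tokens else pvA_emit tokens rp tokens.length 0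

-- ===== PORT B =====
-- keys = sorted(a for a, b in zip(tokens, tokens[1:]) if a.isalpha() and b.isdigit())
def pvB_keys (tokens : List String) : List String :=
  PySem.List.sorted
    (((tokens.zip (PySem.List.slice tokens (some 1) none)).filter
        (fun p => PySem.Str.strIsalpha p.1 && PySem.Str.strIsdigit p.2)).map (·.1))
    (fun x => x) false

-- dups = {a for a, b in zip(keys, keys[1:]) if a == b}
def pvB_dups (tokens : List String) : PySem.Set String :=
  PySem.Set.ofList
    ((((pvB_keys tokens).zip (PySem.List.slice (pvB_keys tokens) (some 1) none)).filter
        (fun p => p.1 == p.2)).map (·.1))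

-- streaming pass with a carry flag (out, skip)
def strip_numeric_suffix_py_alt (tokens : List String) : List String :=
  let dups := pvB_dups tokens
  (tokens.foldl
    (fun (st : List String × Bool) t =>
      if st.2 && PySem.Str.strIsdigit t then (st.1, false)
      else (st.1 ++ [t], PySem.Set.contains dups t))
    ([], false)).1

-- ===== PRECONDITION & SPEC =====
def Spec_strip_numeric_suffix_py (tokens : List String) (out : List String) : Prop := out = strip_numeric_suffix_py_alt tokens
instance (tokens : List String) (out : List String) : Decidable (Spec_strip_numeric_suffix_py tokens out) := by unfold Spec_strip_numeric_suffix_py; infer_instance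

-- ===== CLAIM (what is proved, stated in full; the proofs are below) =====
def Claim_equal_strip_numeric_suffix_py : Prop := ∀ (tokens : List String), Dom_strip_numeric_suffix_py tokens → Spec_strip_numeric_suffix_py tokens (strip_numeric_suffix_py tokens)

-- ===== LEMMAS AND PROOFS =====

-- proof-side vocabulary
def pvPairs (tokens : List String) : List (String × String) := tokens.zip tokens.tail
def pvCps (tokens : List String) : List (String × String) :=
  (pvPairs tokens).filter (fun p => PySem.Str.strIsalpha p.1 && PySem.Str.strIsdigit p.2)
def pvKeyList (tokens : List String) : List String := (pvCps tokens).map (·.1)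
def pvNums (tokens : List String) (a : String) : List String :=
  ((pvCps tokens).filter (fun p => p.1 == a)).map (·.2)
-- "the adjacent pair at index i gets removed": pvP; pvQ i = token i is a removed digit
def pvP (tokens : List String) (i : Nat) : Bool :=
  decide (i + 1 < tokens.length) && PySem.Str.strIsalpha (tokens.getD i "") &&
    PySem.Str.strIsdigit (tokens.getD (i + 1) "") &&
    decide (2 ≤ (pvKeyList tokens).count (tokens.getD i ""))
def pvQ (tokens : List String) (i : Nat) : Bool := decide (0 < i) && pvP tokens (i - 1)
-- the common flat per-index reference pass
def pvSB (tokens : List String) (i : Nat) : List String :=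
  if _h : i < tokens.length then
    (if pvQ tokens i then [] else [tokens.getD i ""]) ++ pvSB tokens (i + 1)
  else []
termination_by tokens.length - i
-- B's emission as a structural recursion over the remaining tokens
def pvEmitRec (dups : PySem.Set String) : Bool → List String → List String
  | _, [] => []
  | b, t :: ts =>
    if b && PySem.Str.strIsdigit t then pvEmitRec dups false ts
    else t :: pvEmitRec dups (PySem.Set.contains dups t) ts

lemma pv_getD_elem (tokens : List String) (i : Nat) (h : i < tokens.length) :
    tokens.getD i "" = tokens[i] := by
  rw [List.getD_eq_getElem?_getD, List.getElem?_eq_getElem h, Option.getD_some]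

lemma pv_getD_eq (tokens : List String) (i : Nat) :
    PySem.List.pyGetD tokens (i : Int) "" = tokens.getD i "" := by
  simp

lemma pv_getD_succ_eq (tokens : List String) (i : Nat) :
    PySem.List.pyGetD tokens ((i : Int) + 1) "" = tokens.getD (i + 1) "" := by
  have hcast : ((i : Int) + 1) = (((i + 1 : Nat) : Int)) := by push_cast; ring
  rw [hcast, PySem.List.pyGetD_natCast]

lemma pv_zip_tail_drop (tokens : List String) (i : Nat) (h : i + 1 < tokens.length) :
    (tokens.drop i).zip (tokens.drop i).tail =
      (tokens.getD i "", tokens.getD (i + 1) "") ::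
        (tokens.drop (i + 1)).zip (tokens.drop (i + 1)).tail := by
  have h1 : i < tokens.length := Nat.lt_of_succ_lt h
  rw [List.drop_eq_getElem_cons h1, List.drop_eq_getElem_cons h]
  simp only [List.tail_cons, List.zip_cons_cons]
  rw [pv_getD_elem tokens i h1, pv_getD_elem tokens (i + 1) h]

lemma pv_zip_tail_short (tokens : List String) (i : Nat) (h : ¬ i + 1 < tokens.length) :
    (tokens.drop i).zip (tokens.drop i).tail = [] := by
  cases hdi : tokens.drop i with
  | nil => simp
  | cons x xs =>
    have hlen := congrArg List.length hdi
    simp only [List.length_drop, List.length_cons] at hlen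
    have hx : xs = [] := List.eq_nil_of_length_eq_zero (by omega)
    simp [hx]

lemma pv_collect_eq (tokens : List String) (fuel : Nat) :
    ∀ (i : Nat) (d : PySem.Dict String (List String)), tokens.length ≤ i + fuel + 1 →
      pvA_collect tokens d fuel i =
        ((tokens.drop i).zip (tokens.drop i).tail).foldl
          (fun d p =>
            if PySem.Str.strIsalpha p.1 && PySem.Str.strIsdigit p.2 then
              d.modify p.1 [] (· ++ [p.2])
            else d) d := by
  induction fuel with
  | zero =>
    intro i d hfuel
    rw [pv_zip_tail_short tokens i (by omega)]
    rfl
  | succ fuel ih =>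
    intro i d hfuel
    by_cases h : i + 1 < tokens.length
    · rw [pvA_collect, if_pos h, ih (i + 1) _ (by omega), pv_zip_tail_drop tokens i h,
        List.foldl_cons]
      congr 1
      rw [pv_getD_eq, pv_getD_succ_eq]
    · rw [pvA_collect, if_neg h, pv_zip_tail_short tokens i h]
      rfl

lemma pv_getD_pn (tokens : List String) (a : String) :
    (pvA_collect tokens PySem.Dict.empty tokens.length 0).getD a [] = pvNums tokens a := by
  rw [pv_collect_eq tokens tokens.length 0 PySem.Dict.empty (by omega), List.drop_zero,
    ← List.foldl_filter, PySem.Dict.getD_foldl_modify_append]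
  simp [pvNums, pvCps, pvPairs]

lemma pv_keys_pn (tokens : List String) :
    (pvA_collect tokens PySem.Dict.empty tokens.length 0).keys = PySem.Set.ofList (pvKeyList tokens) := by
  rw [pv_collect_eq tokens tokens.length 0 PySem.Dict.empty (by omega), List.drop_zero,
    ← List.foldl_filter]
  have h1 := PySem.Dict.keys_foldl_modify_key (pvCps tokens) (fun p => p.1) []
    (fun _ p => (· ++ [p.2])) PySem.Dict.empty
  refine Eq.trans h1 ?_
  rw [PySem.Dict.keys_empty, PySem.Set.ofList_eq_foldl]
  rfl

lemma pv_nodup_keys_pn (tokens : List String) :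
    (pvA_collect tokens PySem.Dict.empty tokens.length 0).keys.Nodup := by
  rw [pv_collect_eq tokens tokens.length 0 PySem.Dict.empty (by omega), List.drop_zero,
    ← List.foldl_filter]
  exact PySem.Dict.nodup_keys_foldl_modify_key (pvCps tokens) (fun p => p.1) []
    (fun _ p => (· ++ [p.2])) PySem.Dict.empty
    (by rw [PySem.Dict.keys_empty]; exact List.nodup_nil)

lemma pv_mem_inner (a : String) (l : List String) (s : PySem.Set (String × String))
    (x : String × String) :
    x ∈ l.foldl (fun s n => PySem.Set.add s (a, n)) s ↔ x ∈ s ∨ ∃ n ∈ l, x = (a, n) := by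
  induction l generalizing s with
  | nil => simp
  | cons n l ih =>
    rw [List.foldl_cons, ih]
    simp [PySem.Set.mem_add]
    tauto

lemma pv_mem_rp_items (L : List (String × List String)) (s : PySem.Set (String × String))
    (x : String × String) :
    x ∈ L.foldl
        (fun s p =>
          if 2 ≤ p.2.length then p.2.foldl (fun s n => PySem.Set.add s (p.1, n)) s else s) s
      ↔ x ∈ s ∨ ∃ p ∈ L, 2 ≤ p.2.length ∧ ∃ n ∈ p.2, x = (p.1, n) := by
  induction L generalizing s with
  | nil => simp
  | cons p L ih =>
    rw [List.foldl_cons, ih]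
    by_cases hp : 2 ≤ p.2.length
    · rw [if_pos hp, pv_mem_inner]
      simp [hp, or_assoc]
    · rw [if_neg hp]
      simp [hp]

lemma pv_mem_keyList_of_mem_nums (tokens : List String) (a b : String)
    (hb : b ∈ pvNums tokens a) : a ∈ pvKeyList tokens := by
  obtain ⟨p, hp, hpb⟩ := List.mem_map.mp hb
  obtain ⟨hpc, hpa⟩ := List.mem_filter.mp hp
  have : p.1 = a := by simpa using hpa
  exact this ▸ List.mem_map.mpr ⟨p, hpc, rfl⟩

lemma pv_mem_rp (tokens : List String) (a b : String) :
    (a, b) ∈ pvA_removePairs (pvA_collect tokens PySem.Dict.empty tokens.length 0) ↔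
      2 ≤ (pvNums tokens a).length ∧ b ∈ pvNums tokens a := by
  unfold pvA_removePairs
  rw [pv_mem_rp_items,
    PySem.Dict.items_eq_map_keys _ (pv_nodup_keys_pn tokens) [], pv_keys_pn]
  simp only [PySem.Set.empty, List.not_mem_nil, false_or, List.mem_map,
    PySem.Set.mem_ofList]
  constructor
  · rintro ⟨q, ⟨k, hk, rfl⟩, hlen, n, hn, heq⟩
    obtain ⟨rfl, rfl⟩ := Prod.mk.injEq .. ▸ heq
    rw [pv_getD_pn] at hlen hn
    exact ⟨hlen, hn⟩
  · rintro ⟨hlen, hb⟩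
    refine ⟨(a, (pvA_collect tokens PySem.Dict.empty tokens.length 0).getD a []),
      ⟨a, pv_mem_keyList_of_mem_nums tokens a b hb, rfl⟩, ?_, b, ?_, rfl⟩
    · rw [pv_getD_pn]; exact hlen
    · rw [pv_getD_pn]; exact hb

lemma pv_count_keyList (tokens : List String) (a : String) :
    (pvKeyList tokens).count a = (pvNums tokens a).length := by
  simp only [pvKeyList, pvNums, List.length_map, List.count, List.countP_map]
  exact List.countP_eq_length_filter ..

lemma pv_alpha_not_digit (s : String) (h : PySem.Str.strIsalpha s = true) :
    PySem.Str.strIsdigit s = false := by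
  simp only [PySem.Str.strIsalpha, PySem.Str.strIsdigit, PySem.Chars.strIsalpha,
    PySem.Chars.strIsdigit] at h ⊢
  cases hs : s.toList with
  | nil => simp [hs] at h
  | cons c cs =>
    rw [hs] at h
    simp only [Bool.and_eq_true, List.all_cons] at h
    have hc : PySem.Chars.isalpha c = true := h.2.1
    have hd : PySem.Chars.isdigit c = false := by
      simp only [PySem.Chars.isalpha, PySem.Chars.isupper, PySem.Chars.islower,
        PySem.Chars.isdigit, Bool.or_eq_true, Bool.and_eq_true, decide_eq_true_eq,
        Char.le_def] at hc ⊢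
      rcases hc with ⟨h2, _⟩ | ⟨h2, _⟩
      · exact Bool.and_eq_false_iff.mpr (Or.inr (by
          simp only [decide_eq_false_iff_not]
          intro hle
          exact absurd (UInt32.le_trans h2 hle) (by decide)))
      · exact Bool.and_eq_false_iff.mpr (Or.inr (by
          simp only [decide_eq_false_iff_not]
          intro hle
          exact absurd (UInt32.le_trans h2 hle) (by decide)))
    simp [hd]

lemma pv_pair_mem (tokens : List String) (i : Nat) (h : i + 1 < tokens.length) :
    (tokens.getD i "", tokens.getD (i + 1) "") ∈ pvPairs tokens := by
  have h1 : i < tokens.length := Nat.lt_of_succ_lt h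
  have h2 : i < (tokens.zip tokens.tail).length := by
    simp [List.length_zip, List.length_tail]
    omega
  have h3 : i < tokens.tail.length := by simp [List.length_tail]; omega
  have hz : (tokens.zip tokens.tail)[i]'h2 = (tokens[i]'h1, tokens.tail[i]'h3) :=
    List.getElem_zip ..
  have ht : tokens.tail[i]'h3 = tokens[i + 1]'h := by
    simp [List.getElem_tail]
  have heq : (tokens.zip tokens.tail)[i]'h2 = (tokens.getD i "", tokens.getD (i + 1) "") := by
    rw [hz, ht, pv_getD_elem tokens i h1, pv_getD_elem tokens (i + 1) h]
  exact heq ▸ List.getElem_mem h2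

lemma pv_mem_rp_iff_P (tokens : List String) (i : Nat) (h : i + 1 < tokens.length) :
    ((tokens.getD i "", tokens.getD (i + 1) "") ∈
        pvA_removePairs (pvA_collect tokens PySem.Dict.empty tokens.length 0)) ↔ pvP tokens i = true := by
  rw [pv_mem_rp]
  simp only [pvP, Bool.and_eq_true, decide_eq_true_eq]
  constructor
  · rintro ⟨hlen, hb⟩
    obtain ⟨p, hp, hpb⟩ := List.mem_map.mp hb
    obtain ⟨hpc, hpa⟩ := List.mem_filter.mp hp
    obtain ⟨_, hcond⟩ := List.mem_filter.mp hpc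
    have hpa' : p.1 = tokens.getD i "" := by simpa using hpa
    simp only [Bool.and_eq_true] at hcond
    refine ⟨⟨⟨h, ?_⟩, ?_⟩, ?_⟩
    · rw [← hpa']; exact hcond.1
    · rw [← hpb]; exact hcond.2
    · rw [pv_count_keyList]; exact hlen
  · rintro ⟨⟨⟨-, halpha⟩, hdigit⟩, hcount⟩
    rw [pv_count_keyList] at hcount
    have hcps : (tokens.getD i "", tokens.getD (i + 1) "") ∈ pvCps tokens :=
      List.mem_filter.mpr ⟨pv_pair_mem tokens i h,
        by simp only [Bool.and_eq_true]; exact ⟨halpha, hdigit⟩⟩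
    have hnum : tokens.getD (i + 1) "" ∈ pvNums tokens (tokens.getD i "") :=
      List.mem_map.mpr ⟨_, List.mem_filter.mpr ⟨hcps, by simp⟩, rfl⟩
    exact ⟨hcount, hnum⟩

-- ===== B-side lemmas =====

lemma pv_mem_keyList_alpha (tokens : List String) (a : String)
    (ha : a ∈ pvKeyList tokens) : PySem.Str.strIsalpha a = true := by
  obtain ⟨p, hp, hpa⟩ := List.mem_map.mp ha
  obtain ⟨-, hcond⟩ := List.mem_filter.mp hp
  simp only [Bool.and_eq_true] at hcond
  exact hpa ▸ hcond.1

lemma pv_keys_eq_sorted (tokens : List String) :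
    pvB_keys tokens = PySem.List.sorted (pvKeyList tokens) (fun x => x) false := by
  unfold pvB_keys pvKeyList pvCps pvPairs
  rw [PySem.List.slice_from_one]

-- in a ≤-sorted list, an element heads an equal adjacent pair iff it occurs at least twice
lemma pvEmitRec_nil (dups : PySem.Set String) (b : Bool) : pvEmitRec dups b [] = [] := rfl

lemma pvEmitRec_cons (dups : PySem.Set String) (b : Bool) (t : String) (ts : List String) :
    pvEmitRec dups b (t :: ts) =
      if b && PySem.Str.strIsdigit t then pvEmitRec dups false ts
      else t :: pvEmitRec dups (PySem.Set.contains dups t) ts := rfl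

-- in a ≤-sorted list, an element heads an equal adjacent pair iff it occurs at least twice
lemma pv_dup_scan (s : List String) (hs : s.Pairwise (· ≤ ·)) (a : String) :
    (a ∈ ((s.zip s.tail).filter (fun p => p.1 == p.2)).map (·.1)) ↔ 2 ≤ s.count a := by
  induction s with
  | nil => simp
  | cons x t ih =>
    cases t with
    | nil =>
      have h1 : List.count a [x] ≤ 1 := by
        simpa using List.count_le_length (l := [x]) (a := a)
      simp only [List.tail_cons, List.zip_nil_right, List.filter_nil, List.map_nil,
        List.not_mem_nil, false_iff, not_le]
      omega
    | cons y r =>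
      have hxy : x ≤ y := (List.pairwise_cons.mp hs).1 y (List.mem_cons_self ..)
      have hyr : ∀ b ∈ r, y ≤ b := fun b hb =>
        (List.pairwise_cons.mp (List.pairwise_cons.mp hs).2).1 b hb
      have ht : (y :: r).Pairwise (· ≤ ·) := (List.pairwise_cons.mp hs).2
      have hcc : List.count a (x :: y :: r) =
          List.count a (y :: r) + (if x = a then 1 else 0) := by
        simp [List.count_cons]
      rw [List.tail_cons, List.zip_cons_cons, List.filter_cons]
      constructor
      · intro hmem
        by_cases hcond : ((x, y).1 == (x, y).2) = true
        · rw [if_pos hcond] at hmem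
          rcases List.mem_cons.mp hmem with h | h
          · have hx : a = x := by simpa using h
            have hxy2 : x = y := by simpa using hcond
            subst hx
            rw [← hxy2, List.count_cons_self, List.count_cons_self]
            omega
          · have := (ih ht).mp h
            rw [hcc]
            omega
        · rw [if_neg hcond] at hmem
          have := (ih ht).mp hmem
          rw [hcc]
          omega
      · intro hcount
        by_cases hxa : x = a
        · subst hxa
          have hmem2 : x ∈ y :: r := by
            rw [List.count_cons_self] at hcount
            exact List.count_pos_iff.mp (by omega)
          have hyx : y = x := by
            rcases List.mem_cons.mp hmem2 with h | h
            · exact h.symm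
            · exact le_antisymm (hyr x h) hxy
          subst hyx
          rw [if_pos (by simp), List.map_cons]
          exact List.mem_cons_self ..
        · have hcount2 : 2 ≤ List.count a (y :: r) := by
            rw [hcc, if_neg hxa] at hcount
            omega
          have hmem2 := (ih ht).mpr hcount2
          by_cases hcond : ((x, y).1 == (x, y).2) = true
          · rw [if_pos hcond, List.map_cons]
            exact List.mem_cons_of_mem _ hmem2
          · rw [if_neg hcond]
            exact hmem2

lemma pv_contains_dups (tokens : List String) (a : String) :
    PySem.Set.contains (pvB_dups tokens) a = decide (2 ≤ (pvKeyList tokens).count a) := by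
  have hperm : (PySem.List.sorted (pvKeyList tokens) (fun x => x) false).Perm (pvKeyList tokens) :=
    PySem.List.sorted_perm ..
  have hpw : (PySem.List.sorted (pvKeyList tokens) (fun x => x) false).Pairwise (· ≤ ·) := by
    have := PySem.List.sorted_pairwise (pvKeyList tokens) (fun x => x)
    simpa using this
  have hiff := pv_dup_scan (PySem.List.sorted (pvKeyList tokens) (fun x => x) false) hpw a
  rw [hperm.count_eq] at hiff
  have hmem : PySem.Set.contains (pvB_dups tokens) a = true ↔
      2 ≤ (pvKeyList tokens).count a := by
    rw [← hiff]
    unfold pvB_dups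
    rw [pv_keys_eq_sorted, PySem.List.slice_from_one]
    simp [PySem.Set.contains, PySem.Set.mem_ofList]
  cases hc : PySem.Set.contains (pvB_dups tokens) a
  · rw [hc] at hmem
    simp only [Bool.false_eq_true, false_iff] at hmem
    rw [decide_eq_false hmem]
  · rw [hc] at hmem
    simp only [true_iff] at hmem
    exact (decide_eq_true hmem).symm

lemma pv_contains_dups_false_of_digit (tokens : List String) (a : String)
    (hd : PySem.Str.strIsdigit a = true) :
    PySem.Set.contains (pvB_dups tokens) a = false := by
  rw [pv_contains_dups]
  simp only [decide_eq_false_iff_not]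
  intro hcount
  have hmem : a ∈ pvKeyList tokens := List.count_pos_iff.mp (by omega)
  have := pv_alpha_not_digit a (pv_mem_keyList_alpha tokens a hmem)
  rw [this] at hd
  exact absurd hd (by simp)

lemma pv_flag_eq_Q (tokens : List String) (i : Nat) (h : i < tokens.length) :
    ((decide (0 < i) && PySem.Set.contains (pvB_dups tokens) (tokens.getD (i - 1) "")) &&
        PySem.Str.strIsdigit (tokens.getD i "")) = pvQ tokens i := by
  by_cases h0 : 0 < i
  · have hii : i - 1 + 1 = i := Nat.succ_pred_eq_of_pos h0
    rw [pv_contains_dups]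
    unfold pvQ pvP
    rw [hii]
    refine Bool.eq_iff_iff.mpr ?_
    simp only [Bool.and_eq_true, decide_eq_true_eq]
    constructor
    · rintro ⟨⟨-, hcount⟩, hdig⟩
      have hmem : tokens.getD (i - 1) "" ∈ pvKeyList tokens :=
        List.count_pos_iff.mp (by omega)
      exact ⟨h0, ⟨⟨h, pv_mem_keyList_alpha tokens _ hmem⟩, hdig⟩, hcount⟩
    · rintro ⟨-, ⟨⟨-, -⟩, hdig⟩, hcount⟩
      exact ⟨⟨h0, hcount⟩, hdig⟩
  · have hi : i = 0 := by omega
    subst hi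
    simp [pvQ]

lemma pv_fold_emitRec (dups : PySem.Set String) (l : List String) :
    ∀ (acc : List String) (b : Bool),
      (l.foldl
        (fun (st : List String × Bool) t =>
          if st.2 && PySem.Str.strIsdigit t then (st.1, false)
          else (st.1 ++ [t], PySem.Set.contains dups t)) (acc, b)).1
      = acc ++ pvEmitRec dups b l := by
  induction l with
  | nil => intro acc b; simp [pvEmitRec_nil]
  | cons t ts ih =>
    intro acc b
    rw [List.foldl_cons]
    by_cases hc : (b && PySem.Str.strIsdigit t) = true
    · rw [if_pos hc, ih acc false, pvEmitRec_cons, if_pos hc]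
    · rw [if_neg hc, ih (acc ++ [t]) (PySem.Set.contains dups t), pvEmitRec_cons, if_neg hc]
      simp

lemma pv_emitRec_eq_sB (tokens : List String) (i : Nat) :
    pvEmitRec (pvB_dups tokens)
      (decide (0 < i) && PySem.Set.contains (pvB_dups tokens) (tokens.getD (i - 1) ""))
      (tokens.drop i) = pvSB tokens i := by
  unfold pvSB
  by_cases h : i < tokens.length
  · rw [dif_pos h, List.drop_eq_getElem_cons h, ← pv_getD_elem tokens i h]
    unfold pvEmitRec
    rw [pv_flag_eq_Q tokens i h]
    cases hq : pvQ tokens i with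
    | true =>
      simp only [if_true, List.nil_append]
      have hdig : PySem.Str.strIsdigit (tokens.getD i "") = true := by
        have hq' := hq
        simp only [pvQ, pvP, Bool.and_eq_true, decide_eq_true_eq] at hq'
        obtain ⟨h0, ⟨⟨-, -⟩, hdig⟩, -⟩ := hq'
        have hii : i - 1 + 1 = i := by omega
        rwa [hii] at hdig
      have hflag : (decide (0 < i + 1) &&
          PySem.Set.contains (pvB_dups tokens) (tokens.getD (i + 1 - 1) "")) = false := by
        rw [Nat.add_sub_cancel, pv_contains_dups_false_of_digit tokens _ hdig]
        simp
      rw [← hflag]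
      exact pv_emitRec_eq_sB tokens (i + 1)
    | false =>
      simp only [Bool.false_eq_true, if_false, List.singleton_append]
      have hflag : (decide (0 < i + 1) &&
          PySem.Set.contains (pvB_dups tokens) (tokens.getD (i + 1 - 1) "")) =
          PySem.Set.contains (pvB_dups tokens) (tokens.getD i "") := by
        rw [Nat.add_sub_cancel]
        simp
      rw [← hflag]
      rw [pv_emitRec_eq_sB tokens (i + 1)]
  · rw [dif_neg h, List.drop_eq_nil_of_le (by omega), pvEmitRec_nil]
termination_by tokens.length - i

lemma pv_alt_eq_sB (tokens : List String) :
    strip_numeric_suffix_py_alt tokens = pvSB tokens 0 := by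
  unfold strip_numeric_suffix_py_alt
  rw [pv_fold_emitRec (pvB_dups tokens) tokens [] false, List.nil_append]
  have h0 : (false : Bool) =
      (decide (0 < 0) && PySem.Set.contains (pvB_dups tokens) (tokens.getD (0 - 1) "")) := by
    simp
  rw [h0, show tokens = tokens.drop 0 from List.drop_zero.symm]
  exact pv_emitRec_eq_sB tokens 0

-- ===== A emits pvSB =====

lemma pv_P_false_of_no_match (tokens : List String) (i : Nat)
    (hm : ¬ (i + 1 < tokens.length ∧
      PySem.Set.contains (pvA_removePairs (pvA_collect tokens PySem.Dict.empty tokens.length 0))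
        (PySem.List.pyGetD tokens (i : Int) "", PySem.List.pyGetD tokens ((i : Int) + 1) "") = true)) :
    pvP tokens i = false := by
  by_contra hP
  rw [Bool.not_eq_false] at hP
  have hlen : i + 1 < tokens.length := by
    have hP' := hP
    simp only [pvP, Bool.and_eq_true, decide_eq_true_eq] at hP'
    exact hP'.1.1.1
  apply hm
  refine ⟨hlen, ?_⟩
  rw [pv_getD_eq, pv_getD_succ_eq]
  simp only [PySem.Set.contains, List.contains_iff_mem]
  exact (pv_mem_rp_iff_P tokens i hlen).mpr hP

lemma pv_emit_eq_sB (tokens : List String) (fuel i : Nat)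
    (hfuel : tokens.length ≤ i + fuel) (hq : pvQ tokens i = false) :
    pvA_emit tokens (pvA_removePairs (pvA_collect tokens PySem.Dict.empty tokens.length 0))
      fuel i = pvSB tokens i := by
  match fuel with
  | 0 =>
    unfold pvSB
    rw [dif_neg (by omega)]
    rfl
  | fuel + 1 =>
  unfold pvSB
  rw [pvA_emit]
  by_cases h : i < tokens.length
  · rw [if_pos h, dif_pos h, hq]
    simp only [Bool.false_eq_true, if_false, List.singleton_append]
    by_cases hm : i + 1 < tokens.length ∧
        PySem.Set.contains (pvA_removePairs (pvA_collect tokens PySem.Dict.empty tokens.length 0))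
          (PySem.List.pyGetD tokens (i : Int) "", PySem.List.pyGetD tokens ((i : Int) + 1) "") = true
    · rw [if_pos hm, pv_getD_eq]
      have hP : pvP tokens i = true := by
        rw [← pv_mem_rp_iff_P tokens i hm.1]
        have hm2 := hm.2
        rw [pv_getD_eq, pv_getD_succ_eq] at hm2
        simpa [PySem.Set.contains, List.contains_iff_mem] using hm2
      have hq1 : pvQ tokens (i + 1) = true := by
        simp [pvQ, hP]
      have hdigit : PySem.Str.strIsdigit (tokens.getD (i + 1) "") = true := by
        have hP' := hP
        simp only [pvP, Bool.and_eq_true] at hP'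
        exact hP'.1.2
      have hq2 : pvQ tokens (i + 2) = false := by
        have hna : PySem.Str.strIsalpha (tokens.getD (i + 1) "") = false := by
          by_contra hh
          rw [Bool.not_eq_false] at hh
          rw [pv_alpha_not_digit _ hh] at hdigit
          exact absurd hdigit (by simp)
        have hP2 : pvP tokens (i + 1) = false := by
          simp only [pvP, hna, Bool.and_false, Bool.false_and]
        rw [pvQ, show i + 2 - 1 = i + 1 from rfl, hP2, Bool.and_false]
      have hskip : pvSB tokens (i + 1) = pvSB tokens (i + 2) := by
        conv_lhs => unfold pvSB
        rw [dif_pos hm.1, hq1]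
        simp
      rw [pv_emit_eq_sB tokens fuel (i + 2) (by omega) hq2, hskip]
    · rw [if_neg hm, pv_getD_eq]
      have hq1 : pvQ tokens (i + 1) = false := by
        simp only [pvQ, Nat.add_sub_cancel, Bool.and_eq_false_iff]
        right
        exact pv_P_false_of_no_match tokens i hm
      rw [pv_emit_eq_sB tokens fuel (i + 1) (by omega) hq1]
  · rw [if_neg h, dif_neg h]
termination_by fuel

lemma pv_rp_empty_sB (tokens : List String)
    (he : (pvA_removePairs (pvA_collect tokens PySem.Dict.empty tokens.length 0)).isEmpty = true) (i : Nat) :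
    pvSB tokens i = tokens.drop i := by
  unfold pvSB
  by_cases h : i < tokens.length
  · rw [dif_pos h]
    have hq : pvQ tokens i = false := by
      by_contra hq
      rw [Bool.not_eq_false] at hq
      simp only [pvQ, Bool.and_eq_true, decide_eq_true_eq] at hq
      obtain ⟨h0, hP⟩ := hq
      have hlen : i - 1 + 1 < tokens.length := by
        have hP' := hP
        simp only [pvP, Bool.and_eq_true, decide_eq_true_eq] at hP'
        exact hP'.1.1.1
      have hmem := (pv_mem_rp_iff_P tokens (i - 1) hlen).mpr hP
      rw [List.isEmpty_iff] at he
      rw [he] at hmem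
      exact absurd hmem List.not_mem_nil
    rw [hq, pv_rp_empty_sB tokens he (i + 1), List.drop_eq_getElem_cons h,
      pv_getD_elem tokens i h]
    simp
  · rw [dif_neg h, List.drop_eq_nil_of_le (by omega)]
termination_by tokens.length - i

-- ===== VERDICT (by name: the statement is the Claim_ definition above) =====
theorem strip_numeric_suffix_py_spec : Claim_equal_strip_numeric_suffix_py := by
  intro tokens _
  unfold Spec_strip_numeric_suffix_py strip_numeric_suffix_py
  rw [pv_alt_eq_sB]
  by_cases he : (pvA_removePairs (pvA_collect tokens PySem.Dict.empty tokens.length 0)).isEmpty = true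
  · rw [if_pos he, pv_rp_empty_sB tokens he 0, List.drop_zero]
  · rw [if_neg he]
    exact pv_emit_eq_sB tokens tokens.length 0 (by omega) (by simp [pvQ])
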